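-- pv_equiv track=rewrite | github.com/danielbsimpson/personal_robot | tests/test_rag_integration.py | _build_rag_section
-- ===== SOURCE A (Python) =====
-- def _build_rag_section(results: list[str], rag_budget: int) -> str:
--     """Replicate the injection logic from app.py and main.py."""
--     if not results:
--         return ""
--     kept, total_chars = [], 0
--     for result in results:
--         entry = f"- {result}"
--         if total_chars + len(entry) + 1 > rag_budget:
--             break
--         kept.append(entry)
--         total_chars += len(entry) + 1
--     if not kept:
--         return ""
--     return "## Relevant Memory\n\n" + "\n".join(kept)
-- ===== SOURCE B (Python) =====
-- def _build_rag_section(results: list[str], rag_budget: int) -> str: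
--     entries = ['- ' + r for r in results]
--     cumulative = []
--     running = 0
--     for e in entries:
--         running += len(e) + 1
--         cumulative.append(running)
--     # cumulative is strictly increasing, so binary-search the cut point:
--     # largest count with cumulative[count-1] <= rag_budget
--     lo, hi = 0, len(cumulative)
--     while lo < hi:
--         mid = (lo + hi) // 2
--         if cumulative[mid] <= rag_budget:
--             lo = mid + 1
--         else:
--             hi = mid
--     kept = entries[:lo]
--     if not kept:
--         return ""
--     return "## Relevant Memory\n\n" + "\n".join(kept)
-- ===== Notes on version B (the rewrite author's own statement) =====
-- stated objective: alternative
-- what changed: Replaces the accumulate-with-break greedy loop by building the full prefix-sum (cumulative cost) table and binary-searching it for the cut point, then slicing the entry list.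
import Mathlib
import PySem

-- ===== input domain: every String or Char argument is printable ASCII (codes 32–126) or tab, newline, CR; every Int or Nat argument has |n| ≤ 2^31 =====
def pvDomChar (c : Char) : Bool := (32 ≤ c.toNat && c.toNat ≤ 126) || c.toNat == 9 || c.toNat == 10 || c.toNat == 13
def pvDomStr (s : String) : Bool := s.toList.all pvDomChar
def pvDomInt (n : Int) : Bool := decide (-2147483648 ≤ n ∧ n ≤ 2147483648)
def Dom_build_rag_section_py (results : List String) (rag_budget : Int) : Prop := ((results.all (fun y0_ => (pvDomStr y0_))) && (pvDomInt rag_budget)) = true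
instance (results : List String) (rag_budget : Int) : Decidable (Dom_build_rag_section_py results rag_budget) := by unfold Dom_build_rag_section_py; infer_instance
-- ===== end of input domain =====

-- B replaces A's accumulate-with-break greedy loop by a full prefix-sum table plus a
-- binary search for the cut point (objective: alternative algorithm, same result).

-- ===== PORT A =====
-- the Python for-loop with break, state (kept, total_chars)
def bragA_loop (rag_budget : Int) : List String → List String → Int → List String
  | [], kept, _ => kept
  | result :: rest, kept, total =>
      let entry := "- " ++ result
      if total + PySem.Str.len entry + 1 > rag_budget then kept
      else bragA_loop rag_budget rest (kept ++ [entry]) (total + PySem.Str.len entry + 1)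

def build_rag_section_py (results : List String) (rag_budget : Int) : String :=
  if results = [] then ""
  else
    let kept := bragA_loop rag_budget results [] 0
    if kept = [] then ""
    else "## Relevant Memory\n\n" ++ PySem.Str.join "\n" kept

-- ===== PORT B =====
-- the hand-written while-loop binary search from Source B (lo/hi on the cumulative table)
def bragB_bsearch (cum : List Int) (budget : Int) (lo hi : Nat) : Nat :=
  if _h : lo < hi then
    let mid := (lo + hi) / 2
    if cum.getD mid 0 ≤ budget then bragB_bsearch cum budget (mid + 1) hi
    else bragB_bsearch cum budget lo mid
  else lo
termination_by hi - lo
decreasing_by all_goals omega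

def build_rag_section_py_alt (results : List String) (rag_budget : Int) : String :=
  let entries := results.map (fun r => "- " ++ r)
  let cumulative := (entries.foldl
      (fun (acc : List Int × Int) e =>
        (acc.1 ++ [acc.2 + PySem.Str.len e + 1], acc.2 + PySem.Str.len e + 1))
      ([], 0)).1
  let count := bragB_bsearch cumulative rag_budget 0 cumulative.length
  let kept := entries.take count
  if kept = [] then ""
  else "## Relevant Memory\n\n" ++ PySem.Str.join "\n" kept

-- ===== PRECONDITION & SPEC =====
def Spec_build_rag_section_py (results : List String) (rag_budget : Int) (out : String) : Prop := out = build_rag_section_py_alt results rag_budget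
instance (results : List String) (rag_budget : Int) (out : String) : Decidable (Spec_build_rag_section_py results rag_budget out) := by unfold Spec_build_rag_section_py; infer_instance

-- ===== CLAIM (what is proved, stated in full; the proofs are below) =====
def Claim_equal_build_rag_section_py : Prop := ∀ (results : List String) (rag_budget : Int), Dom_build_rag_section_py results rag_budget → Spec_build_rag_section_py results rag_budget (build_rag_section_py results rag_budget)

-- ===== LEMMAS AND PROOFS =====

-- cost of one result: len('- ' + r) + 1
def bragCost (r : String) : Int := PySem.Str.len ("- " ++ r) + 1

-- pure cumulative-sum list starting from t
def bragCum (t : Int) : List Int → List Int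
  | [] => []
  | c :: cs => (t + c) :: bragCum (t + c) cs

-- greedy count: how many leading entries A keeps
def bragG (budget : Int) : List String → Int → Nat
  | [], _ => 0
  | r :: rs, t => if t + bragCost r > budget then 0 else bragG budget rs (t + bragCost r) + 1

theorem bragCost_pos (r : String) : 0 < bragCost r := by
  simp [bragCost, PySem.Str.len_eq]
  omega

theorem bragCum_length (cs : List Int) : ∀ t, (bragCum t cs).length = cs.length := by
  induction cs with
  | nil => intro t; simp [bragCum]
  | cons c cs ih => intro t; simp [bragCum, ih]

theorem bragCum_getD (cs : List Int) : ∀ t i, i < cs.length →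
    (bragCum t cs).getD i 0 = t + (cs.take (i + 1)).sum := by
  induction cs with
  | nil => intro t i h; simp at h
  | cons c cs ih =>
    intro t i h
    cases i with
    | zero => simp [bragCum]
    | succ i =>
      simp only [bragCum, List.getD_cons_succ, List.take_succ_cons, List.sum_cons]
      rw [ih (t + c) i (by simpa using h)]
      ring

theorem braq_sum_take_nonneg (cs : List Int) (hpos : ∀ c ∈ cs, 0 < c) :
    ∀ j, 0 ≤ (cs.take j).sum := by
  induction cs with
  | nil => intro j; simp
  | cons c cs ih =>
    intro j
    cases j with
    | zero => simp
    | succ j =>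
      simp only [List.take_succ_cons, List.sum_cons]
      have h1 : 0 < c := hpos c (by simp)
      have h2 := ih (fun c hc => hpos c (by simp [hc])) j
      omega

theorem braq_sum_take_mono (cs : List Int) (hpos : ∀ c ∈ cs, 0 < c) :
    ∀ i j, i ≤ j → (cs.take i).sum ≤ (cs.take j).sum := by
  induction cs with
  | nil => intro i j _; simp
  | cons c cs ih =>
    intro i j hij
    cases i with
    | zero =>
      simp only [List.take_zero, List.sum_nil]
      cases j with
      | zero => simp
      | succ j =>
        simp only [List.take_succ_cons, List.sum_cons]
        have h1 : 0 < c := hpos c (by simp)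
        have h2 := braq_sum_take_nonneg cs (fun c hc => hpos c (by simp [hc])) j
        omega
    | succ i =>
      cases j with
      | zero => omega
      | succ j =>
        simp only [List.take_succ_cons, List.sum_cons]
        have := ih (fun c hc => hpos c (by simp [hc])) i j (by omega)
        omega

theorem bragCum_mono (cs : List Int) (hpos : ∀ c ∈ cs, 0 < c) (t : Int)
    (i j : Nat) (hij : i ≤ j) (hj : j < cs.length) :
    (bragCum t cs).getD i 0 ≤ (bragCum t cs).getD j 0 := by
  rw [bragCum_getD cs t i (by omega), bragCum_getD cs t j hj]
  have := braq_sum_take_mono cs hpos (i + 1) (j + 1) (by omega)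
  omega

-- the property that pins down the cut count uniquely
def bragProp (cum : List Int) (budget : Int) (k : Nat) : Prop :=
  k ≤ cum.length ∧ (∀ i, i < k → cum.getD i 0 ≤ budget) ∧
    (∀ i, k ≤ i → i < cum.length → budget < cum.getD i 0)

theorem bragProp_unique (cum : List Int) (budget : Int) (k₁ k₂ : Nat)
    (h₁ : bragProp cum budget k₁) (h₂ : bragProp cum budget k₂) : k₁ = k₂ := by
  obtain ⟨hl₁, hle₁, hgt₁⟩ := h₁
  obtain ⟨hl₂, hle₂, hgt₂⟩ := h₂
  by_contra hne
  rcases Nat.lt_or_ge k₁ k₂ with h | h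
  · have := hgt₁ k₁ (le_refl _) (by omega)
    have := hle₂ k₁ h
    omega
  · have hlt : k₂ < k₁ := by omega
    have := hgt₂ k₂ (le_refl _) (by omega)
    have := hle₁ k₂ hlt
    omega

-- binary search finds a k satisfying bragProp (given monotone cum and the loop invariant)
theorem bragB_bsearch_inv (cum : List Int) (budget : Int)
    (hmono : ∀ i j, i ≤ j → j < cum.length → cum.getD i 0 ≤ cum.getD j 0) :
    ∀ n lo hi, hi - lo = n → lo ≤ hi → hi ≤ cum.length →
      (∀ i, i < lo → cum.getD i 0 ≤ budget) →
      (∀ i, hi ≤ i → i < cum.length → budget < cum.getD i 0) →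
      bragProp cum budget (bragB_bsearch cum budget lo hi) := by
  intro n
  induction n using Nat.strong_induction_on with
  | _ n ih =>
    intro lo hi hn hlohi hhi hlow hhigh
    rw [bragB_bsearch]
    by_cases h : lo < hi
    · simp only [h, dif_pos]
      set mid := (lo + hi) / 2 with hmid
      have hmlt : mid < hi := by omega
      have hmge : lo ≤ mid := by omega
      by_cases hc : cum.getD mid 0 ≤ budget
      · simp only [hc, if_pos]
        exact ih (hi - (mid + 1)) (by omega) (mid + 1) hi rfl (by omega) hhi
          (fun i hi' => le_trans (hmono i mid (by omega) (by omega)) hc) hhigh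
      · simp only [hc, if_neg, not_false_iff]
        have hgt : budget < cum.getD mid 0 := by omega
        exact ih (mid - lo) (by omega) lo mid rfl (by omega) (by omega) hlow
          (fun i hmi hil => lt_of_lt_of_le hgt (hmono mid i hmi hil))
    · simp only [h, dif_neg, not_false_iff]
      have : lo = hi := by omega
      exact ⟨by omega, fun i hi' => hlow i hi', fun i hi' hil => hhigh i (by omega) hil⟩

-- the greedy count also satisfies bragProp on the cumulative list
theorem bragG_prop (budget : Int) (rs : List String) : ∀ t,
    bragProp (bragCum t (rs.map bragCost)) budget (bragG budget rs t) := by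
  induction rs with
  | nil => intro t; exact ⟨by simp [bragG, bragCum], by simp [bragG], by simp [bragG, bragCum]⟩
  | cons r rs ih =>
    intro t
    by_cases hb : t + bragCost r > budget
    · refine ⟨by simp [bragG, hb, bragCum, bragCum_length], by simp [bragG, hb], ?_⟩
      intro i _ hil
      have hpos : ∀ c ∈ (r :: rs).map bragCost, 0 < c := by
        intro c hc; simp only [List.mem_map] at hc; obtain ⟨s, _, rfl⟩ := hc; exact bragCost_pos s
      have hil' : i < ((r :: rs).map bragCost).length := by
        simpa [bragCum_length] using hil
      have h0 := bragCum_mono ((r :: rs).map bragCost) hpos t 0 i (by omega) hil'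
      have : (bragCum t ((r :: rs).map bragCost)).getD 0 0 = t + bragCost r := by
        simp [bragCum]
      omega
    · obtain ⟨ihl, ihle, ihgt⟩ := ih (t + bragCost r)
      refine ⟨?_, ?_, ?_⟩
      · simp only [bragG, hb, if_neg, not_false_iff]
        simp only [List.map_cons, bragCum, List.length_cons]
        omega
      · intro i hik
        simp only [bragG, hb, if_neg, not_false_iff] at hik
        cases i with
        | zero => simp [bragCum]; omega
        | succ i => simpa [bragCum] using ihle i (by omega)
      · intro i hik hil
        simp only [bragG, hb, if_neg, not_false_iff] at hik
        cases i with
        | zero => omega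
        | succ i =>
          simp only [List.map_cons, bragCum, List.length_cons] at hil ⊢
          simpa using ihgt i (by omega) (by omega)

-- B's foldl builds exactly the cumulative list
theorem bragB_foldl (es : List String) : ∀ (acc : List Int) (t : Int),
    (es.foldl
      (fun (acc : List Int × Int) e =>
        (acc.1 ++ [acc.2 + PySem.Str.len e + 1], acc.2 + PySem.Str.len e + 1))
      (acc, t)).1 = acc ++ bragCum t (es.map (fun e => PySem.Str.len e + 1)) := by
  induction es with
  | nil => intro acc t; simp [bragCum]
  | cons e es ih =>
    intro acc t
    simp only [List.foldl_cons, List.map_cons, bragCum]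
    rw [ih]
    simp [add_assoc]

-- costs on entries = bragCost on results
theorem bragCost_map (results : List String) :
    (results.map (fun r => "- " ++ r)).map (fun e => PySem.Str.len e + 1)
      = results.map bragCost := by
  simp only [List.map_map]
  refine List.map_congr_left (fun a _ => ?_)
  have h2 : ("- " : String).length = 2 := by decide
  simp [bragCost, PySem.Str.len_eq, h2]
  omega

-- A's loop = prefix of the entry list of length (greedy count)
theorem bragA_loop_eq (budget : Int) (rs : List String) : ∀ (kept : List String) (t : Int),
    bragA_loop budget rs kept t
      = kept ++ (rs.map (fun r => "- " ++ r)).take (bragG budget rs t) := by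
  induction rs with
  | nil => intro kept t; simp [bragA_loop, bragG]
  | cons r rs ih =>
    intro kept t
    simp only [bragA_loop, bragG, List.map_cons]
    by_cases hb : t + PySem.Str.len ("- " ++ r) + 1 > budget
    · have hbG : t + bragCost r > budget := by simp only [bragCost]; omega
      rw [if_pos hb, if_pos hbG]
      simp
    · have hbG : ¬ t + bragCost r > budget := by simp only [bragCost]; omega
      rw [if_neg hb, if_neg hbG, ih]
      have hsame : t + PySem.Str.len ("- " ++ r) + 1 = t + bragCost r := by
        simp only [bragCost]; ring
      rw [hsame, List.take_succ_cons]
      simp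

-- ===== VERDICT (by name: the statement is the Claim_ definition above) =====
theorem build_rag_section_py_spec : Claim_equal_build_rag_section_py := by
  intro results rag_budget _
  unfold Spec_build_rag_section_py build_rag_section_py build_rag_section_py_alt
  set entries := results.map (fun r => "- " ++ r) with hentries
  have hcum : (entries.foldl
      (fun (acc : List Int × Int) e =>
        (acc.1 ++ [acc.2 + PySem.Str.len e + 1], acc.2 + PySem.Str.len e + 1))
      ([], 0)).1 = bragCum 0 (results.map bragCost) := by
    rw [bragB_foldl entries [] 0, hentries, bragCost_map]; simp
  simp only [hcum]
  have hpos : ∀ c ∈ results.map bragCost, 0 < c := by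
    intro c hc; simp only [List.mem_map] at hc; obtain ⟨s, _, rfl⟩ := hc; exact bragCost_pos s
  have hmono : ∀ i j, i ≤ j → j < (bragCum 0 (results.map bragCost)).length →
      (bragCum 0 (results.map bragCost)).getD i 0 ≤ (bragCum 0 (results.map bragCost)).getD j 0 := by
    intro i j hij hj
    exact bragCum_mono _ hpos 0 i j hij (by simpa [bragCum_length] using hj)
  have hsearch := bragB_bsearch_inv (bragCum 0 (results.map bragCost)) rag_budget hmono
      ((bragCum 0 (results.map bragCost)).length) 0 ((bragCum 0 (results.map bragCost)).length)
      (by omega) (by omega) (le_refl _) (by omega) (by omega)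
  have hcount : bragB_bsearch (bragCum 0 (results.map bragCost)) rag_budget 0
      ((bragCum 0 (results.map bragCost)).length) = bragG rag_budget results 0 :=
    bragProp_unique _ _ _ _ hsearch (bragG_prop rag_budget results 0)
  rw [hcount, bragA_loop_eq]
  simp only [List.nil_append]
  cases results with
  | nil => simp [bragG]
  | cons r rs => simp [hentries]
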